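-- pv_equiv track=rewrite | github.com/peepgen-artifact/peepgen | generalization/utils.py | extract_alive2_cte
-- ===== SOURCE A (Python) =====
-- def extract_alive2_cte(err):
--     """
--     Extract counterexample from Alive2 error output.
--     """
--     lines = err.strip().split('\n')
--     in_example = False
--     example_lines = []
--     for line in lines:
--         if line.startswith('Transformation doesn\'t verify!'):
--             in_example = True
--         if in_example:
--             example_lines.append(line)
--     return '\n'.join(example_lines)
-- ===== SOURCE B (Python) =====
-- def extract_alive2_cte(err):
--     """Extract counterexample from Alive2 error output."""
--     lines = err.strip().split('\n')
--     for i, line in enumerate(lines):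
--         if line.startswith("Transformation doesn't verify!"):
--             return '\n'.join(lines[i:])
--     return ''
-- ===== Notes on version B (the rewrite author's own statement) =====
-- stated objective: simpler
-- what changed: Replaced the flag-accumulating loop (boolean state plus growing example_lines list) with an early-return scan that finds the first marker line and joins the remaining suffix in one slice.
import Mathlib
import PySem

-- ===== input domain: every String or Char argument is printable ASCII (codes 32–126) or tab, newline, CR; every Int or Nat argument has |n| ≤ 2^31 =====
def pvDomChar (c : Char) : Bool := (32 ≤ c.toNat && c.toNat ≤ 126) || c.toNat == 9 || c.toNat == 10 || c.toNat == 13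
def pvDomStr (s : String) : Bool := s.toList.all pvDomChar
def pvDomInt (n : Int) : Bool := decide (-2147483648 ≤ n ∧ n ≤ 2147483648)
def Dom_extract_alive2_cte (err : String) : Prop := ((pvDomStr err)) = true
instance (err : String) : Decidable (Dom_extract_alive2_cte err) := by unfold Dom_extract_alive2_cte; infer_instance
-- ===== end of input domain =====

-- B replaces A's flag-accumulate loop by a find-first-marker scan returning the joined suffix (simpler decomposition).

-- ===== PORT A =====
-- the loop state: (in_example, example_lines), folded over the lines in order
def extract_alive2_cte (err : String) : String :=
  let lines := (PySem.Str.split? (PySem.Str.strip err) "\n").getD []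
  let st := lines.foldl
    (fun (st : Bool × List String) line =>
      let inEx := if PySem.Str.startswith line "Transformation doesn't verify!" then true else st.1
      (inEx, if inEx then st.2 ++ [line] else st.2))
    (false, [])
  PySem.Str.join "\n" st.2

-- ===== PORT B =====
-- early-return scan: first line starting with the marker → join of that suffix; else ""
def pvScanB : List String → String
  | [] => ""
  | line :: rest =>
    if PySem.Str.startswith line "Transformation doesn't verify!" then
      PySem.Str.join "\n" (line :: rest)
    else
      pvScanB rest

def extract_alive2_cte_alt (err : String) : String :=
  pvScanB ((PySem.Str.split? (PySem.Str.strip err) "\n").getD [])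

-- ===== PRECONDITION & SPEC =====
def Spec_extract_alive2_cte (err : String) (out : String) : Prop := out = extract_alive2_cte_alt err
instance (err : String) (out : String) : Decidable (Spec_extract_alive2_cte err out) := by unfold Spec_extract_alive2_cte; infer_instance

-- ===== CLAIM (what is proved, stated in full; the proofs are below) =====
def Claim_equal_extract_alive2_cte : Prop := ∀ (err : String), Dom_extract_alive2_cte err → Spec_extract_alive2_cte err (extract_alive2_cte err)

-- ===== LEMMAS AND PROOFS =====
-- once the flag is true A appends every remaining line
theorem pvFoldTrue (ls : List String) (acc : List String) :
    ls.foldl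
      (fun (st : Bool × List String) line =>
        let inEx := if PySem.Str.startswith line "Transformation doesn't verify!" then true else st.1
        (inEx, if inEx then st.2 ++ [line] else st.2))
      (true, acc) = (true, acc ++ ls) := by
  induction ls generalizing acc with
  | nil => simp
  | cons l ls ih =>
    rw [List.foldl_cons]
    simp only [ite_self, if_true]
    rw [ih]
    simp

theorem pvFoldEqScan (ls : List String) :
    PySem.Str.join "\n"
      (ls.foldl
        (fun (st : Bool × List String) line =>
          let inEx := if PySem.Str.startswith line "Transformation doesn't verify!" then true else st.1
          (inEx, if inEx then st.2 ++ [line] else st.2))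
        (false, [])).2 = pvScanB ls := by
  induction ls with
  | nil => rfl
  | cons l ls ih =>
    rw [List.foldl_cons]
    cases h : PySem.Str.startswith l "Transformation doesn't verify!" with
    | true =>
      simp only [h, if_true, ite_self]
      rw [pvFoldTrue]
      simp only [pvScanB, h, if_true, List.nil_append, List.singleton_append]
    | false =>
      simp only [h, Bool.false_eq_true, if_false]
      rw [pvScanB, if_neg (by simp only [Bool.not_eq_true]; exact h)]
      exact ih

-- ===== VERDICT (by name: the statement is the Claim_ definition above) =====
theorem extract_alive2_cte_spec : Claim_equal_extract_alive2_cte := by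
  intro err _
  unfold Spec_extract_alive2_cte extract_alive2_cte extract_alive2_cte_alt
  exact pvFoldEqScan _
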